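-- pv_equiv track=rewrite | github.com/KAdamczykk/LearningPY | macierze/macierze_kartka.py | srednia_nie_ujm_kol
-- ===== SOURCE A (Python) =====
-- def srednia_nie_ujm_kol(A):
--     wiersze = len(A)
--     kolumny = len(A[0])
--     B = [[] for a in range(wiersze)]
--     for j in range(kolumny):
--         suma= 0
--         for i in range(wiersze):
--             suma+=A[i][j]
--         srednia = suma/wiersze
--         if srednia<0:
--             continue
--         else:
--             for i in range(wiersze):
--                 B[i].append(  A[i][j])
--     return B
-- ===== SOURCE B (Python) =====
-- def srednia_nie_ujm_kol(A):
--     # build the columns in one row-major pass, keep those with non-negative sum,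
--     # and transpose back
--     cols = [[] for _ in range(len(A[0]))]
--     for row in A:
--         for j, c in enumerate(cols):
--             c.append(row[j])
--     kept = [c for c in cols if sum(c) >= 0]
--     return [list(r) for r in zip(*kept)] if kept else [[] for _ in A]
-- ===== Notes on version B (the rewrite author's own statement) =====
-- stated objective: alternative
-- what changed: B transposes the matrix in one row-major pass (distributing each row into per-column accumulators), filters whole columns by non-negative sum (same sign as the average since wiersze > 0), and transposes back with zip, emitting wiersze empty rows when no column survives; A instead walks indices column-major, recomputing each column sum with an inner index loop and interleaving appends into per-row accumulators.
import Mathlib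
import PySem

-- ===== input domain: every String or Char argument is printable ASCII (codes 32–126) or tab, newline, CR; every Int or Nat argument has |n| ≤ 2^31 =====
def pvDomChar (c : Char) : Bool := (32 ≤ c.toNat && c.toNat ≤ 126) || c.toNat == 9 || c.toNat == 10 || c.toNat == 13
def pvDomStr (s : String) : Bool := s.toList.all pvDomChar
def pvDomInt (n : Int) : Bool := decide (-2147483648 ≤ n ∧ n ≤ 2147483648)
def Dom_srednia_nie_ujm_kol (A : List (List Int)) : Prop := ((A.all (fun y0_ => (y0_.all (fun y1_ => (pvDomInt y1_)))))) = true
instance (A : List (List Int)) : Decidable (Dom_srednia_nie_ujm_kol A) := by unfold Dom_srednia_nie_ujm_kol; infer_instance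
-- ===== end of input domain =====

-- B transposes the matrix in one row-major pass, filters whole columns by
-- non-negative sum, and transposes back with zip, instead of A's column-major
-- index loops with interleaved appends into per-row accumulators; same cost.

-- ===== PORT A =====
-- A[i][j] and the column sum as A computes it
def pvCol (A : List (List Int)) (i j : Nat) : Int := (A.getD i []).getD j 0
def pvSum (A : List (List Int)) (j : Nat) : Int :=
  (List.range A.length).foldl (fun s i => s + pvCol A i j) 0

def srednia_nie_ujm_kol (A : List (List Int)) : List (List Int) :=
  let wiersze := A.length
  let kolumny := (A.headD []).length
  let B0 : List (List Int) := (List.range wiersze).map (fun _ => ([] : List Int))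
  (List.range kolumny).foldl (fun B j =>
    let suma := pvSum A j
    -- srednia = suma / wiersze (float); srednia < 0 ↔ suma < 0 since wiersze > 0 on Pre_
    if suma < 0 then B
    else (List.range wiersze).foldl
      (fun B' i => B'.set i ((B'.getD i []) ++ [pvCol A i j])) B) B0

-- ===== PORT B =====
-- zip(*M): rows truncated to the shortest; exact for index i below the minimum length
def pvZipStar (M : List (List Int)) : List (List Int) :=
  if M.isEmpty then []
  else (List.range (((M.map List.length).min?).getD 0)).map
         (fun i => M.map (fun r => r.getD i 0))

def srednia_nie_ujm_kol_alt (A : List (List Int)) : List (List Int) :=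
  let cols0 : List (List Int) := (List.range ((A.headD []).length)).map (fun _ => ([] : List Int))
  let cols := A.foldl (fun cs row => cs.mapIdx (fun j c => c ++ [row.getD j 0])) cols0
  let kept := cols.filter (fun c => decide (0 ≤ c.sum))
  if kept.isEmpty then A.map (fun _ => ([] : List Int)) else pvZipStar kept

-- ===== PRECONDITION & SPEC =====
-- Pre_ excludes exactly the inputs where Python A raises: the empty matrix (IndexError on A[0])
-- and ragged inputs where some row is shorter than row 0 (IndexError on A[i][j]).
def Pre_srednia_nie_ujm_kol (A : List (List Int)) : Prop :=
  A ≠ [] ∧ ∀ r ∈ A, (A.headD []).length ≤ r.length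
instance (A : List (List Int)) : Decidable (Pre_srednia_nie_ujm_kol A) := by
  unfold Pre_srednia_nie_ujm_kol; infer_instance
def pvWitness_srednia_nie_ujm_kol : List (List Int) := [[1, -2], [3, 4]]
def Spec_srednia_nie_ujm_kol (A : List (List Int)) (out : List (List Int)) : Prop := out = srednia_nie_ujm_kol_alt A
instance (A : List (List Int)) (out : List (List Int)) : Decidable (Spec_srednia_nie_ujm_kol A out) := by unfold Spec_srednia_nie_ujm_kol; infer_instance

-- ===== CLAIM (what is proved, stated in full; the proofs are below) =====
def Claim_equal_srednia_nie_ujm_kol : Prop := ∀ (A : List (List Int)), Dom_srednia_nie_ujm_kol A → Pre_srednia_nie_ujm_kol A → Spec_srednia_nie_ujm_kol A (srednia_nie_ujm_kol A)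

-- ===== LEMMAS AND PROOFS =====

-- the inner append loop of A: setting each index once equals a positional map
lemma pv_fold_set_append (x : Nat → Int) :
    ∀ (k : Nat) (L : List (List Int)),
      (List.range k).foldl (fun B' i => B'.set i ((B'.getD i []) ++ [x i])) L
        = L.mapIdx (fun i r => if i < k then r ++ [x i] else r) := by
  intro k
  induction k with
  | zero =>
    intro L
    apply List.ext_getElem
    · simp
    · intro i h1 h2; simp [List.getElem_mapIdx]
  | succ k ih =>
    intro L
    rw [List.range_succ, List.foldl_append, ih]
    simp only [List.foldl_cons, List.foldl_nil]
    apply List.ext_getElem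
    · simp
    · intro i h1 h2
      have h2' : i < L.length := by simpa using h2
      simp only [List.getElem_set, List.getElem_mapIdx]
      rcases eq_or_ne k i with rfl | hne
      · simp [List.getElem?_eq_getElem h2']
      · rw [if_neg hne]
        rcases lt_or_ge i k with h | h
        · simp [h, Nat.lt_succ_of_lt h]
        · have hnk : ¬ i < k := by omega
          have h3 : ¬ i < k + 1 := by omega
          simp [hnk, h3]

-- mapIdx over a map of range is a map of range with the index available
lemma pv_mapIdx_range_map {α β : Type} (n : Nat) (g : Nat → α) (f : Nat → α → β) :
    ((List.range n).map g).mapIdx f = (List.range n).map (fun i => f i (g i)) := by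
  apply List.ext_getElem
  · simp
  · intro i h1 h2
    simp [List.getElem_mapIdx]

-- A's accumulator after the first k columns: the row comprehension over kept indices
lemma pv_foldA_eq (A : List (List Int)) :
    ∀ (k : Nat),
      (List.range k).foldl (fun B j =>
          if pvSum A j < 0 then B
          else (List.range A.length).foldl
            (fun B' i => B'.set i ((B'.getD i []) ++ [pvCol A i j])) B)
        ((List.range A.length).map (fun _ => ([] : List Int)))
      = (List.range A.length).map
          (fun i => ((List.range k).filter (fun j => decide (0 ≤ pvSum A j))).map
            (fun j => pvCol A i j)) := by
  intro k
  induction k with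
  | zero => simp
  | succ k ih =>
    rw [List.range_succ, List.foldl_append, ih]
    simp only [List.foldl_cons, List.foldl_nil]
    rw [List.filter_append]
    by_cases h : pvSum A k < 0
    · have hd : decide (0 ≤ pvSum A k) = false := by simpa using not_le.mpr h
      rw [if_pos h]
      simp [hd]
    · have hd : decide (0 ≤ pvSum A k) = true := by simpa using not_lt.mp (by omega)
      rw [if_neg h]
      rw [pv_fold_set_append (fun i => pvCol A i k), pv_mapIdx_range_map]
      apply List.map_congr_left
      intro i hi
      have hi' : i < A.length := List.mem_range.mp hi
      simp [hi', hd]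

-- so A's result is the positional row comprehension
lemma pv_A_eq (A : List (List Int)) :
    srednia_nie_ujm_kol A
      = (List.range A.length).map
          (fun i => ((List.range ((A.headD []).length)).filter
              (fun j => decide (0 ≤ pvSum A j))).map (fun j => pvCol A i j)) := by
  unfold srednia_nie_ujm_kol
  exact pv_foldA_eq A ((A.headD []).length)

-- all lengths equal to c and nonempty ⇒ min? of the lengths is c
lemma pv_min_const (l : List Nat) (c : Nat) (hne : l ≠ []) (h : ∀ x ∈ l, x = c) :
    l.min?.getD 0 = c := by
  have hmem : c ∈ l := by
    cases l with
    | nil => exact absurd rfl hne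
    | cons a t => have := h a (by simp); rw [← this]; exact List.mem_cons_self
  have : l.min? = some c := by
    rw [List.min?_eq_some_iff]
    exact ⟨hmem, fun b hb => le_of_eq (h b hb).symm⟩
  simp [this]

-- zip(*M) as a range-map, when every row has length ≥ the minimum c which is attained
lemma pv_zipStar_eq (M : List (List Int)) (c : Nat) (hne : M ≠ [])
    (hmin : (M.map List.length).min?.getD 0 = c) :
    pvZipStar M = (List.range c).map (fun i => M.map (fun r => r.getD i 0)) := by
  unfold pvZipStar
  rw [if_neg (by simpa using hne), hmin]

-- column sum: A's index fold equals the sum of the materialised column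
lemma pv_sum_eq (A : List (List Int)) (j : Nat) :
    (A.map (fun r => r.getD j 0)).sum = pvSum A j := by
  unfold pvSum
  have h1 : ∀ (n : Nat) (f : Nat → Int),
      (List.range n).foldl (fun s i => s + f i) 0 = ((List.range n).map f).sum := by
    intro n f
    induction n with
    | zero => simp
    | succ n ih => rw [List.range_succ]; simp [List.foldl_append, ih]
  rw [h1]
  congr 1
  apply List.ext_getElem
  · simp
  · intro i hi1 hi2
    have hi : i < A.length := by simpa using hi1
    simp [pvCol, List.getD_eq_getElem?_getD, List.getElem?_eq_getElem hi]

-- B's row-major distribution pass materialises exactly the positional columns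
lemma pv_cols_eq (m : Nat) :
    ∀ (rows : List (List Int)) (init : Nat → List Int),
      rows.foldl (fun cs row => cs.mapIdx (fun j c => c ++ [row.getD j 0]))
        ((List.range m).map init)
      = (List.range m).map (fun j => init j ++ rows.map (fun r => r.getD j 0)) := by
  intro rows
  induction rows with
  | nil => intro init; simp
  | cons r rs ih =>
    intro init
    simp only [List.foldl_cons]
    rw [pv_mapIdx_range_map, ih (fun j => init j ++ [r.getD j 0])]
    apply List.map_congr_left
    intro j _
    simp

-- ===== VERDICT (by name: the statement is the Claim_ definition above) =====
theorem srednia_nie_ujm_kol_spec : Claim_equal_srednia_nie_ujm_kol := by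
  intro A _ _
  set m := (A.headD []).length with hm
  have hcols :
      A.foldl (fun cs row => cs.mapIdx (fun j c => c ++ [row.getD j 0]))
        ((List.range m).map (fun _ => ([] : List Int)))
      = (List.range m).map (fun j => A.map (fun r => r.getD j 0)) := by
    rw [pv_cols_eq]
    simp
  -- the filtered columns are the kept-index comprehension of columns
  have hkept :
      ((List.range m).map (fun j => A.map (fun r => r.getD j 0))).filter
          (fun c => decide (0 ≤ c.sum))
        = ((List.range m).filter (fun j => decide (0 ≤ pvSum A j))).map
            (fun j => A.map (fun r => r.getD j 0)) := by
    rw [List.filter_map]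
    congr 1
    apply List.filter_congr
    intro j _
    have hs := pv_sum_eq A j
    simp only [List.getD_eq_getElem?_getD] at hs
    simp [Function.comp, hs]
  unfold Spec_srednia_nie_ujm_kol
  rw [pv_A_eq]
  unfold srednia_nie_ujm_kol_alt
  simp only []
  rw [hcols, hkept]
  set keep := (List.range m).filter (fun j => decide (0 ≤ pvSum A j)) with hkeep
  by_cases hk : keep = []
  · -- no column kept: both sides are A.length empty rows
    rw [hk]
    simp only [List.map_nil, List.isEmpty_nil, if_pos]
    apply List.ext_getElem
    · simp
    · intro i h1 h2; simp
  · -- some columns kept: transpose back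
    have hkne : (keep.map (fun j => A.map (fun r => r.getD j 0))) ≠ [] := by
      simpa using hk
    have hminK : ((keep.map (fun j => A.map (fun r => r.getD j 0))).map List.length).min?.getD 0
        = A.length := by
      apply pv_min_const
      · simpa using hk
      · intro x hx
        simp only [List.map_map, List.mem_map] at hx
        obtain ⟨j, _, rfl⟩ := hx
        simp
    rw [if_neg (by simpa using hkne)]
    rw [pv_zipStar_eq _ A.length hkne hminK]
    apply List.map_congr_left
    intro i hi
    have hi' : i < A.length := List.mem_range.mp hi
    rw [List.map_map]
    apply List.map_congr_left
    intro j _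
    simp only [Function.comp]
    simp [pvCol, List.getD_eq_getElem?_getD, List.getElem?_map,
          List.getElem?_eq_getElem hi']
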